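-- pv_equiv track=rewrite | github.com/DM-ai-tools/RankPilot | backend/app/routes/v1/integrations.py | _normalize_wordpress_site_url
-- ===== SOURCE A (Python) =====
-- def _normalize_wordpress_site_url(raw: str) -> str:
--     """Use site root only — /wp-json lives at root, not under /wp-admin."""
--     s = (raw or "").strip().rstrip("/")
--     if not s:
--         return s
--     if not s.startswith(("http://", "https://")):
--         s = "https://" + s
--     low = s.lower()
--     for suffix in ("/wp-admin", "/wp-login.php", "/xmlrpc.php"):
--         if suffix in low:
--             idx = low.find(suffix)
--             s = s[:idx].rstrip("/")
--             low = s.lower()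
--     return s.rstrip("/")
-- ===== SOURCE B (Python) =====
-- def _normalize_wordpress_site_url(raw: str) -> str:
--     """Single left-to-right scan: cut at the leftmost occurrence of any admin suffix."""
--     s = (raw or "").strip().rstrip("/")
--     if not s:
--         return s
--     if not s.startswith(("http://", "https://")):
--         s = "https://" + s
--     low = s.lower()
--     for j in range(len(low)):
--         if low.startswith(("/wp-admin", "/wp-login.php", "/xmlrpc.php"), j):
--             return s[:j].rstrip("/")
--     return s.rstrip("/")
-- ===== Notes on version B (the rewrite author's own statement) =====
-- stated objective: simpler
-- what changed: A repeatedly searches, truncates and re-lowercases per suffix in a three-pass loop; B lowercases once and does a single left-to-right scan that cuts at the leftmost occurrence of any of the three suffixes, returning early.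
import Mathlib
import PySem

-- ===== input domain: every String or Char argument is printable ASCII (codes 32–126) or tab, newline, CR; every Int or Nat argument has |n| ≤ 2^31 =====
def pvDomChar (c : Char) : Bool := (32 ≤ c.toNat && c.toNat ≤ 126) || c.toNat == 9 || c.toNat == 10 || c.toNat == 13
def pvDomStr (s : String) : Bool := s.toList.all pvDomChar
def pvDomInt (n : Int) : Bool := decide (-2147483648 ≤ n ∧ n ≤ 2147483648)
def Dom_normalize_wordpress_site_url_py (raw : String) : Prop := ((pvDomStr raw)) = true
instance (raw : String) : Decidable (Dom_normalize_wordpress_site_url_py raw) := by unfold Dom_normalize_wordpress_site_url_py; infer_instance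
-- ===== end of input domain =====

-- B replaces A's repeated find/truncate/re-lower loop over the three suffixes by a single
-- left-to-right scan that cuts at the leftmost occurrence of any suffix (objective: simpler).

-- hand port of Python's  s.rstrip("/")  (exact: drops trailing '/' characters), used by both Pythons
def rstripSlash (l : List Char) : List Char := (l.reverse.dropWhile (· == '/')).reverse

def pvSufs : List (List Char) := ["/wp-admin".toList, "/wp-login.php".toList, "/xmlrpc.php".toList]

-- ===== PORT A =====
-- loop body of A: state is (s, low), low the cached s.lower()
def pvStepA (st : List Char × List Char) (suffix : List Char) : List Char × List Char :=
  if PySem.Chars.isIn suffix st.2 then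
    let idx := PySem.Chars.find st.2 suffix
    let s' := rstripSlash (PySem.List.slice st.1 none (some idx))
    (s', PySem.Chars.lower s')
  else st

def normalize_wordpress_site_url_py (raw : String) : String :=
  let s0 := rstripSlash (PySem.Chars.strip raw.toList)
  if s0 = [] then String.ofList s0
  else
    let s1 := if PySem.Chars.startswith s0 "http://".toList || PySem.Chars.startswith s0 "https://".toList
              then s0 else "https://".toList ++ s0
    let st := pvSufs.foldl pvStepA (s1, PySem.Chars.lower s1)
    String.ofList (rstripSlash st.1)

-- ===== PORT B =====
-- Source B's scan loop: first index j with low.startswith(suffixes, j), as structural recursion on low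
def pvScan (sufs : List (List Char)) : List Char → Option ℕ
  | [] => none
  | c :: rest =>
    if sufs.any (·.isPrefixOf (c :: rest)) then some 0
    else (pvScan sufs rest).map (· + 1)

def normalize_wordpress_site_url_py_alt (raw : String) : String :=
  let s0 := rstripSlash (PySem.Chars.strip raw.toList)
  if s0 = [] then String.ofList s0
  else
    let s1 := if PySem.Chars.startswith s0 "http://".toList || PySem.Chars.startswith s0 "https://".toList
              then s0 else "https://".toList ++ s0
    match pvScan pvSufs (PySem.Chars.lower s1) with
    | some j => String.ofList (rstripSlash (s1.take j))
    | none => String.ofList (rstripSlash s1)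

-- ===== PRECONDITION & SPEC =====
def Spec_normalize_wordpress_site_url_py (raw : String) (out : String) : Prop := out = normalize_wordpress_site_url_py_alt raw
instance (raw : String) (out : String) : Decidable (Spec_normalize_wordpress_site_url_py raw out) := by unfold Spec_normalize_wordpress_site_url_py; infer_instance

-- ===== CLAIM (what is proved, stated in full; the proofs are below) =====
def Claim_equal_normalize_wordpress_site_url_py : Prop := ∀ (raw : String), Dom_normalize_wordpress_site_url_py raw → Spec_normalize_wordpress_site_url_py raw (normalize_wordpress_site_url_py raw)

-- ===== LEMMAS AND PROOFS =====

-- a suffix is '/', then only non-'/' characters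
def SufOK (b : List Char) : Prop := 2 ≤ b.length ∧ ∀ k < b.length, (b[k]? = some '/' ↔ k = 0)

theorem sufs_ok : ∀ suf ∈ pvSufs, SufOK suf := by unfold SufOK pvSufs; decide

-- positional characterization of "b occurs in l at j"
theorem prefix_drop_iff (b l : List Char) (j : ℕ) (hb : b ≠ []) :
    b <+: l.drop j ↔ j + b.length ≤ l.length ∧ ∀ k, (h : k < b.length) → l[j + k]? = some b[k] := by
  have hbl : 1 ≤ b.length := List.length_pos_of_ne_nil hb
  constructor
  · intro h
    have hlen := h.length_le
    rw [List.length_drop] at hlen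
    refine ⟨by omega, fun k hk => ?_⟩
    have := h.getElem (i := k) hk
    rw [List.getElem_drop] at this
    rw [List.getElem?_eq_getElem (by omega), this]
  · rintro ⟨hlen, h⟩
    rw [List.prefix_iff_eq_take]
    apply List.ext_getElem?
    intro k
    by_cases hk : k < b.length
    · rw [List.getElem?_take, if_pos hk, List.getElem?_drop, h k hk,
        List.getElem?_eq_getElem hk]
    · rw [List.getElem?_eq_none (by omega), List.getElem?_eq_none]
      simp [List.length_take, List.length_drop]; omega

-- ---- rstripSlash facts ----
theorem rs_append (l : List Char) : ∃ n, l = rstripSlash l ++ List.replicate n '/' := by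
  refine ⟨(l.reverse.takeWhile (· == '/')).length, ?_⟩
  unfold rstripSlash
  conv_lhs => rw [← l.reverse_reverse,
    ← List.takeWhile_append_dropWhile (p := (· == '/')) (l := l.reverse)]
  rw [List.reverse_append]
  congr 1
  rw [List.eq_replicate_iff]
  refine ⟨by simp, fun b hb => ?_⟩
  rw [List.mem_reverse] at hb
  have := List.mem_takeWhile_imp hb
  simpa using this

theorem rs_prefix (l : List Char) : rstripSlash l <+: l := by
  obtain ⟨n, hn⟩ := rs_append l
  exact ⟨List.replicate n '/', hn.symm⟩

theorem rs_len_le (l : List Char) : (rstripSlash l).length ≤ l.length :=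
  (rs_prefix l).length_le

theorem rs_take (l : List Char) : rstripSlash l = l.take (rstripSlash l).length :=
  List.prefix_iff_eq_take.mp (rs_prefix l)

theorem rs_slash (l : List Char) (m : ℕ) (h1 : (rstripSlash l).length ≤ m) (h2 : m < l.length) :
    l[m]? = some '/' := by
  obtain ⟨n, hn⟩ := rs_append l
  conv_lhs => rw [hn]
  rw [List.getElem?_append_right h1, List.getElem?_replicate]
  have hlen : l.length = (rstripSlash l).length + n := by
    conv_lhs => rw [hn]; simp
  rw [if_pos (by omega)]

theorem rs_idem (l : List Char) : rstripSlash (rstripSlash l) = rstripSlash l := by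
  unfold rstripSlash
  rw [List.reverse_reverse, List.dropWhile_idempotent]

theorem lowerChar_slash (c : Char) : ((PySem.Chars.lowerChar c) == '/') = (c == '/') := by
  unfold PySem.Chars.lowerChar PySem.Chars.isupper
  split
  · rename_i h
    simp only [Bool.and_eq_true, decide_eq_true_eq] at h
    have h1 : ('A' : Char) ≤ c := h.1
    have h2 : c ≤ ('Z' : Char) := h.2
    have hA : ('A' : Char).toNat = 65 := rfl
    have hZ : ('Z' : Char).toNat = 90 := rfl
    have hc1 : 65 ≤ c.toNat := hA ▸ h1
    have hc2 : c.toNat ≤ 90 := hZ ▸ h2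
    have hv : c.toNat + 32 < 0xD800 := by omega
    have : (Char.ofNat (c.toNat + 32)).toNat = c.toNat + 32 := by
      have hval : (c.toNat + 32).isValidChar := Or.inl (by omega)
      unfold Char.ofNat
      split
      · rfl
      · simp_all
    have hne1 : (Char.ofNat (c.toNat + 32)) ≠ '/' := by
      intro he
      have : (Char.ofNat (c.toNat + 32)).toNat = ('/' : Char).toNat := by rw [he]
      rw [‹(Char.ofNat (c.toNat + 32)).toNat = c.toNat + 32›] at this
      have h47 : ('/' : Char).toNat = 47 := rfl
      omega
    have hne2 : c ≠ '/' := by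
      intro he; subst he; revert hc1; decide
    simp [hne1, hne2]
  · rfl

theorem rs_lower (l : List Char) :
    PySem.Chars.lower (rstripSlash l) = rstripSlash (PySem.Chars.lower l) := by
  have hp : ((fun x : Char => x == '/') ∘ PySem.Chars.lowerChar) = (fun x : Char => x == '/') :=
    funext fun c => lowerChar_slash c
  unfold rstripSlash PySem.Chars.lower
  rw [← List.map_reverse, List.dropWhile_map, hp, List.map_reverse]

theorem rs_take_collapse (l : List Char) (i j : ℕ) (hj : j ≤ (rstripSlash (l.take i)).length) :
    (rstripSlash (l.take i)).take j = l.take j := by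
  conv_lhs => rw [rs_take (l.take i)]
  rw [List.take_take, List.take_take]
  congr 1
  have h2 : (rstripSlash (l.take i)).length ≤ i := le_trans (rs_len_le _) (by simp)
  omega

-- ---- scan characterization ----
def Hit (sufs : List (List Char)) (low : List Char) (j : ℕ) : Prop := ∃ suf ∈ sufs, suf <+: low.drop j

theorem any_iff_hit (sufs : List (List Char)) (l : List Char) :
    sufs.any (·.isPrefixOf l) = true ↔ Hit sufs l 0 := by
  rw [List.any_eq_true]
  unfold Hit
  simp [List.isPrefixOf_iff_prefix]

theorem hit_succ (sufs : List (List Char)) (c : Char) (rest : List Char) (j : ℕ) :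
    Hit sufs (c :: rest) (j + 1) ↔ Hit sufs rest j := by
  unfold Hit
  simp [List.drop_succ_cons]

theorem scan_none_iff (sufs : List (List Char)) (hne : ∀ suf ∈ sufs, suf ≠ []) (low : List Char) :
    pvScan sufs low = none ↔ ∀ j, ¬ Hit sufs low j := by
  induction low with
  | nil =>
    simp only [pvScan, true_iff]
    intro j ⟨suf, hmem, hpre⟩
    rw [List.drop_nil, List.prefix_nil] at hpre
    exact hne suf hmem hpre
  | cons c rest ih =>
    rw [pvScan]
    split
    · rename_i h
      simp only [reduceCtorEq, false_iff, not_forall, not_not]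
      exact ⟨0, (any_iff_hit sufs (c :: rest)).mp h⟩
    · rename_i h
      rw [Option.map_eq_none_iff, ih]
      constructor
      · intro hall j
        cases j with
        | zero => intro hh; exact absurd ((any_iff_hit sufs (c :: rest)).mpr hh) (by simp [h])
        | succ j => rw [hit_succ]; exact hall j
      · intro hall j
        have := hall (j + 1)
        rwa [hit_succ] at this

theorem scan_some_iff (sufs : List (List Char)) (hne : ∀ suf ∈ sufs, suf ≠ []) (low : List Char) (j : ℕ) :
    pvScan sufs low = some j ↔ Hit sufs low j ∧ ∀ j' < j, ¬ Hit sufs low j' := by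
  induction low generalizing j with
  | nil =>
    simp only [pvScan, reduceCtorEq, false_iff, not_and]
    intro ⟨suf, hmem, hpre⟩
    rw [List.drop_nil, List.prefix_nil] at hpre
    exact fun _ => hne suf hmem hpre
  | cons c rest ih =>
    rw [pvScan]
    split
    · rename_i h
      have h0 : Hit sufs (c :: rest) 0 := (any_iff_hit sufs (c :: rest)).mp h
      constructor
      · rintro he; injection he with he; subst he; exact ⟨h0, by omega⟩
      · rintro ⟨hh, hmin⟩
        by_cases hj : j = 0
        · subst hj; rfl
        · exact absurd h0 (hmin 0 (by omega))
    · rename_i h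
      have h0 : ¬ Hit sufs (c :: rest) 0 := fun hh => h ((any_iff_hit sufs (c :: rest)).mpr hh)
      cases j with
      | zero =>
        simp only [Option.map_eq_some_iff]
        constructor
        · rintro ⟨a, _, ha⟩; omega
        · rintro ⟨hh, _⟩; exact absurd hh h0
      | succ j =>
        rw [Option.map_eq_some_iff]
        constructor
        · rintro ⟨a, ha, haeq⟩
          have haj : a = j := by omega
          obtain ⟨hh, hmin⟩ := (ih j).mp (haj ▸ ha)
          refine ⟨(hit_succ sufs c rest j).mpr hh, ?_⟩
          intro j' hj'
          cases j' with
          | zero => exact h0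
          | succ j' => rw [hit_succ]; exact hmin j' (by omega)
        · rintro ⟨hh, hmin⟩
          refine ⟨j, (ih j).mpr ⟨(hit_succ sufs c rest j).mp hh, ?_⟩, rfl⟩
          intro j' hj'
          have := hmin (j' + 1) (by omega)
          rwa [hit_succ] at this

-- ---- the transfer lemma: occurrences after a's cut are the occurrences strictly before the cut ----
theorem transfer (a b low : List Char) (hA : SufOK a) (hB : SufOK b)
    (i : ℕ) (hi : a <+: low.drop i) (j : ℕ) :
    b <+: (rstripSlash (low.take i)).drop j ↔ (b <+: low.drop j ∧ j < i) := by
  have hane : a ≠ [] := by intro h; rw [h] at hA; exact absurd hA.1 (by simp)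
  have hbne : b ≠ [] := by intro h; rw [h] at hB; exact absurd hB.1 (by simp)
  obtain ⟨hailen, haich⟩ := (prefix_drop_iff a low i hane).mp hi
  have hilow : i < low.length := by have := hA.1; omega
  have htakei : (low.take i).length = i := by rw [List.length_take]; omega
  have hL : (rstripSlash (low.take i)).length ≤ i := le_trans (rs_len_le _) (le_of_eq htakei)
  have htL : rstripSlash (low.take i) = low.take ((rstripSlash (low.take i)).length) := by
    conv_lhs => rw [rs_take (low.take i)]
    rw [List.take_take, min_eq_left hL]
  have htget : ∀ m, m < (rstripSlash (low.take i)).length → (rstripSlash (low.take i))[m]? = low[m]? := by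
    intro m hm
    conv_lhs => rw [htL]
    rw [List.getElem?_take, if_pos hm]
  have ha2 : 2 ≤ a.length := hA.1
  -- low[i] is '/', the head of a
  have hslash_i : low[i]? = some '/' := by
    have h0 := haich 0 (by omega)
    have ha0 : a[0]? = some '/' := (hA.2 0 (by omega)).mpr rfl
    rw [List.getElem?_eq_getElem (by omega)] at ha0
    simpa using h0.trans (by simpa using congrArg some (Option.some.inj ha0))
  constructor
  · intro hpre
    obtain ⟨hlen, hch⟩ := (prefix_drop_iff b (rstripSlash (low.take i)) j hbne).mp hpre
    have hblen2 : 2 ≤ b.length := hB.1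
    refine ⟨(prefix_drop_iff b low j hbne).mpr ⟨by omega, fun k hk => ?_⟩, by omega⟩
    rw [← htget (j + k) (by omega)]
    exact hch k hk
  · rintro ⟨hb, hji⟩
    obtain ⟨hblen, hbch⟩ := (prefix_drop_iff b low j hbne).mp hb
    have hblen2 : 2 ≤ b.length := hB.1
    -- step 1: b's occurrence ends at or before the cut point i
    have hend : j + b.length ≤ i := by
      by_contra hlt
      have hk1 : i - j < b.length := by omega
      have hk0 : 0 < i - j := by omega
      have := hbch (i - j) hk1
      rw [show j + (i - j) = i by omega, hslash_i] at this
      have hbk : b[i - j]? = some '/' := by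
        rw [List.getElem?_eq_getElem hk1]
        exact congrArg some (Option.some.inj this).symm
      have := (hB.2 (i - j) hk1).mp hbk
      omega
    -- step 2: b's occurrence ends at or before the rstripped length
    have hend2 : j + b.length ≤ (rstripSlash (low.take i)).length := by
      by_contra hlt
      have hm1 : (rstripSlash (low.take i)).length ≤ j + b.length - 1 := by omega
      have hm2 : j + b.length - 1 < (low.take i).length := by omega
      have hsl := rs_slash (low.take i) (j + b.length - 1) hm1 (by omega)
      rw [List.getElem?_take, if_pos (by omega)] at hsl
      have := hbch (b.length - 1) (by omega)
      rw [show j + (b.length - 1) = j + b.length - 1 by omega, hsl] at this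
      have hbk : b[b.length - 1]? = some '/' := by
        rw [List.getElem?_eq_getElem (by omega)]
        exact congrArg some (Option.some.inj this).symm
      have := (hB.2 (b.length - 1) (by omega)).mp hbk
      omega
    exact (prefix_drop_iff b (rstripSlash (low.take i)) j hbne).mpr ⟨by omega, fun k hk => by
      rw [htget (j + k) (by omega)]
      exact hbch k hk⟩

theorem scan_empty (low : List Char) : pvScan [] low = none := by
  induction low with
  | nil => rfl
  | cons c rest ih => rw [pvScan]; simp [ih]

theorem scan_cons_noocc (a : List Char) (rest : List (List Char)) (low : List Char)
    (h : ∀ j, ¬ a <+: low.drop j) : pvScan (a :: rest) low = pvScan rest low := by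
  induction low with
  | nil => rfl
  | cons c r ih =>
    rw [pvScan, pvScan]
    have ha : a.isPrefixOf (c :: r) = false := by
      rw [Bool.eq_false_iff]
      intro hp
      exact h 0 (by simpa using List.isPrefixOf_iff_prefix.mp hp)
    rw [List.any_cons, ha, Bool.false_or,
      ih (fun j => by simpa [List.drop_succ_cons] using h (j + 1))]

theorem sufok_ne_nil (b : List Char) (h : SufOK b) : b ≠ [] := by
  intro he; rw [he] at h; exact absurd h.1 (by simp)

theorem hit_transfer (a : List Char) (rest : List (List Char)) (low : List Char)
    (hA : SufOK a) (hP : ∀ suf ∈ rest, SufOK suf) (i : ℕ) (hi : a <+: low.drop i) (j : ℕ) :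
    Hit rest (rstripSlash (low.take i)) j ↔ Hit rest low j ∧ j < i := by
  constructor
  · rintro ⟨b, hm, hp⟩
    have := (transfer a b low hA (hP b hm) i hi j).mp hp
    exact ⟨⟨b, hm, this.1⟩, this.2⟩
  · rintro ⟨⟨b, hm, hp⟩, hj⟩
    exact ⟨b, hm, (transfer a b low hA (hP b hm) i hi j).mpr ⟨hp, hj⟩⟩

theorem lower_take (l : List Char) (i : ℕ) :
    PySem.Chars.lower (l.take i) = (PySem.Chars.lower l).take i := by
  unfold PySem.Chars.lower
  rw [List.map_take]

theorem lower_length (l : List Char) : (PySem.Chars.lower l).length = l.length := by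
  unfold PySem.Chars.lower
  rw [List.length_map]

-- ---- main lemma: A's fold = B's scan-and-cut, up to the final rstrip ----
theorem main_lemma (sufs : List (List Char)) (hP : ∀ suf ∈ sufs, SufOK suf) (s : List Char) :
    rstripSlash (sufs.foldl pvStepA (s, PySem.Chars.lower s)).1
      = rstripSlash (match pvScan sufs (PySem.Chars.lower s) with
                     | some j => s.take j
                     | none => s) := by
  induction sufs generalizing s with
  | nil =>
    rw [scan_empty]
    rfl
  | cons a rest ih =>
    have hPa : SufOK a := hP a (by simp)
    have hPrest : ∀ suf ∈ rest, SufOK suf := fun b hb => hP b (List.mem_cons_of_mem a hb)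
    have hne_rest : ∀ suf ∈ rest, suf ≠ [] := fun b hb => sufok_ne_nil b (hPrest b hb)
    rw [List.foldl_cons]
    by_cases h : PySem.Chars.isIn a (PySem.Chars.lower s) = true
    · -- a occurs: cut at its first occurrence
      have hinf : a <:+: PySem.Chars.lower s := (PySem.Chars.isIn_iff_infix a _).mp h
      have hf : 0 ≤ PySem.Chars.find (PySem.Chars.lower s) a :=
        (PySem.Chars.find_nonneg_iff _ _).mpr hinf
      obtain ⟨hocc, hmin⟩ := PySem.Chars.find_spec hf
      have hstep : pvStepA (s, PySem.Chars.lower s) a =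
          (rstripSlash (s.take (PySem.Chars.find (PySem.Chars.lower s) a).toNat),
           PySem.Chars.lower (rstripSlash (s.take (PySem.Chars.find (PySem.Chars.lower s) a).toNat))) := by
        rw [pvStepA]
        simp only [h, if_true]
        rw [PySem.List.slice_to _ hf]
      rw [hstep]
      set i := (PySem.Chars.find (PySem.Chars.lower s) a).toNat with hidef
      have hlow' : PySem.Chars.lower (rstripSlash (s.take i)) = rstripSlash ((PySem.Chars.lower s).take i) := by
        rw [rs_lower, lower_take]
      rw [ih hPrest (rstripSlash (s.take i))]
      have hane : a ≠ [] := sufok_ne_nil a hPa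
      have ha2 : 2 ≤ a.length := hPa.1
      have hilen : i + a.length ≤ (PySem.Chars.lower s).length :=
        ((prefix_drop_iff a _ i hane).mp hocc).1
      have hilow : i < (PySem.Chars.lower s).length := by omega
      have hslen : (PySem.Chars.lower s).length = s.length := lower_length s
      -- occurrences in the cut string are occurrences strictly before the cut
      have htr : ∀ j, Hit rest (PySem.Chars.lower (rstripSlash (s.take i))) j ↔ Hit rest (PySem.Chars.lower s) j ∧ j < i := by
        intro j
        rw [hlow']
        exact hit_transfer a rest _ hPa hPrest i hocc j
      cases ho : pvScan rest (PySem.Chars.lower (rstripSlash (s.take i))) with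
      | some j =>
        obtain ⟨hhit', hmin'⟩ := (scan_some_iff rest hne_rest _ j).mp ho
        obtain ⟨hhit, hji⟩ := (htr j).mp hhit'
        have hscan : pvScan (a :: rest) (PySem.Chars.lower s) = some j := by
          rw [scan_some_iff (a :: rest) (fun b hb => by
            rcases List.mem_cons.mp hb with he | hb
            · exact he ▸ hane
            · exact hne_rest b hb) _ j]
          constructor
          · obtain ⟨b, hm, hp⟩ := hhit
            exact ⟨b, List.mem_cons_of_mem a hm, hp⟩
          · intro j' hj' ⟨b, hm, hp⟩
            rcases List.mem_cons.mp hm with he | hm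
            · exact hmin j' (by omega) (he ▸ hp)
            · exact hmin' j' hj' ((htr j').mpr ⟨⟨b, hm, hp⟩, by omega⟩)
        rw [hscan]
        show rstripSlash ((rstripSlash (s.take i)).take j) = rstripSlash (s.take j)
        -- j is inside the cut string, so cutting it again at j is cutting s at j
        obtain ⟨b, hm, hp⟩ := hhit'
        have hjlt : j < (rstripSlash (s.take i)).length := by
          have hbne := hne_rest b hm
          have := ((prefix_drop_iff b _ j hbne).mp hp).1
          have hb1 : 1 ≤ b.length := List.length_pos_of_ne_nil hbne
          have hll := lower_length (rstripSlash (s.take i))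
          omega
        rw [rs_take_collapse s i j (by omega)]
      | none =>
        have hnone := (scan_none_iff rest hne_rest _).mp ho
        have hscan : pvScan (a :: rest) (PySem.Chars.lower s) = some i := by
          rw [scan_some_iff (a :: rest) (fun b hb => by
            rcases List.mem_cons.mp hb with he | hb
            · exact he ▸ hane
            · exact hne_rest b hb) _ i]
          constructor
          · exact ⟨a, by simp, hocc⟩
          · intro j' hj' ⟨b, hm, hp⟩
            rcases List.mem_cons.mp hm with he | hm
            · exact hmin j' hj' (he ▸ hp)
            · exact hnone j' ((htr j').mpr ⟨⟨b, hm, hp⟩, hj'⟩)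
        rw [hscan]
        show rstripSlash (rstripSlash (s.take i)) = rstripSlash (s.take i)
        rw [rs_idem]
    · -- a does not occur: the step is the identity
      have hstep : pvStepA (s, PySem.Chars.lower s) a = (s, PySem.Chars.lower s) := by
        rw [pvStepA]
        simp [h]
      have hnoocc : ∀ j, ¬ a <+: (PySem.Chars.lower s).drop j := by
        intro j hp
        exact h ((PySem.Chars.isIn_iff_infix a _).mpr (List.infix_iff_prefix_suffix.mpr
          ⟨_, hp, List.drop_suffix j _⟩))
      rw [hstep, ih hPrest s, scan_cons_noocc a rest _ hnoocc]

-- ===== VERDICT (by name: the statement is the Claim_ definition above) =====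
theorem normalize_wordpress_site_url_py_spec : Claim_equal_normalize_wordpress_site_url_py := by
  intro raw _
  unfold Spec_normalize_wordpress_site_url_py normalize_wordpress_site_url_py normalize_wordpress_site_url_py_alt
  simp only
  split
  · rfl
  · have h := main_lemma pvSufs sufs_ok
      (if PySem.Chars.startswith (rstripSlash (PySem.Chars.strip raw.toList)) "http://".toList
          || PySem.Chars.startswith (rstripSlash (PySem.Chars.strip raw.toList)) "https://".toList
       then rstripSlash (PySem.Chars.strip raw.toList)
       else "https://".toList ++ rstripSlash (PySem.Chars.strip raw.toList))
    rw [h]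
    split <;> rfl
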